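-- pv_equiv track=rewrite | github.com/jimmy223316/puzzle_solver | efficient_solver.py | _zero_slide_targets
-- ===== SOURCE A (Python) =====
-- def _zero_slide_targets(pos, n, forbidden):
--     r, c = pos // n, pos % n
--     targets = []
--     for dc in range(1, n-c):
--         nxt = r*n+c+dc
--         if nxt in forbidden: break
--         targets.append(nxt)
--     for dc in range(1, c+1):
--         nxt = r*n+c-dc
--         if nxt in forbidden: break
--         targets.append(nxt)
--     for dr in range(1, n-r):
--         nxt = (r+dr)*n+c
--         if nxt in forbidden: break
--         targets.append(nxt)
--     for dr in range(1, r+1):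
--         nxt = (r-dr)*n+c
--         if nxt in forbidden: break
--         targets.append(nxt)
--     return targets
-- ===== SOURCE B (Python) =====
-- def _zero_slide_targets(pos, n, forbidden):
--     r, c = pos // n, pos % n
--     targets = []
--     for step, count in ((1, n - c - 1), (-1, c), (n, n - r - 1), (-n, r)):
--         cut = count + 1
--         for f in forbidden:
--             d = f - pos
--             if d % step == 0:
--                 q = d // step
--                 if 1 <= q < cut:
--                     cut = q
--         targets.extend(pos + k * step for k in range(1, cut))
--     return targets
-- ===== Notes on version B (the rewrite author's own statement) =====
-- stated objective: alternative
-- what changed: Instead of walking each ray cell by cell with a membership test per cell, B makes one pass over the forbidden list per direction computing the nearest blocker arithmetically (divisibility of f-pos by the step and a running minimum of the quotient), then emits the unblocked prefix directly with range(); the per-cell scan of forbidden disappears.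
import Mathlib
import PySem

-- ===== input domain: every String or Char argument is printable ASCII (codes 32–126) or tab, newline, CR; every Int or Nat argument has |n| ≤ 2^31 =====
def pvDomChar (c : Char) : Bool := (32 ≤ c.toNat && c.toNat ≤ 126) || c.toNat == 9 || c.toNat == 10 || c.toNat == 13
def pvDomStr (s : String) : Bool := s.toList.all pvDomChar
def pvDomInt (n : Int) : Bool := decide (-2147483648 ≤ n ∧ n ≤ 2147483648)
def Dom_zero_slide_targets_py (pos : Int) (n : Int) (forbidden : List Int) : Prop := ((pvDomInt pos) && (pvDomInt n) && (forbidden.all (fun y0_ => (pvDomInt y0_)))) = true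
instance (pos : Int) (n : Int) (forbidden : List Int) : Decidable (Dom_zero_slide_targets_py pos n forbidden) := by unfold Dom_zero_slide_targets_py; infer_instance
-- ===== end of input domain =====

-- B computes, per direction, the nearest blocker arithmetically in one pass over the
-- forbidden list (divisibility of f-pos by the step, running minimum of the quotient)
-- and then emits the unblocked prefix with a range, instead of A's per-cell membership
-- scan along each ray (objective: alternative).

-- ===== PORT A =====
-- one 'for d in range(...)' loop of A with break, threading the shared targets accumulator
def pvScanA (forbidden : List Int) (f : Int → Int) : List Int → List Int → List Int
  | [], acc => acc
  | d :: ds, acc => if f d ∈ forbidden then acc else pvScanA forbidden f ds (acc ++ [f d])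

def zero_slide_targets_py (pos : Int) (n : Int) (forbidden : List Int) : List Int :=
  let r := PySem.Int.floordiv pos n
  let c := PySem.Int.mod pos n
  let t1 := pvScanA forbidden (fun dc => r*n+c+dc) (PySem.List.pyRange 1 (n-c) 1) []
  let t2 := pvScanA forbidden (fun dc => r*n+c-dc) (PySem.List.pyRange 1 (c+1) 1) t1
  let t3 := pvScanA forbidden (fun dr => (r+dr)*n+c) (PySem.List.pyRange 1 (n-r) 1) t2
  pvScanA forbidden (fun dr => (r-dr)*n+c) (PySem.List.pyRange 1 (r+1) 1) t3

-- ===== PORT B =====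
-- Source B's inner loop over forbidden: running minimum cut of the quotients (f-pos)//step
-- that are exact, ≥ 1 and below the current cut
def pvCut (pos step : Int) : List Int → Int → Int
  | [], cut => cut
  | f :: fs, cut =>
      let d := f - pos
      if PySem.Int.mod d step = 0 then
        let q := PySem.Int.floordiv d step
        if 1 ≤ q ∧ q < cut then pvCut pos step fs q else pvCut pos step fs cut
      else pvCut pos step fs cut

def zero_slide_targets_py_alt (pos : Int) (n : Int) (forbidden : List Int) : List Int :=
  let r := PySem.Int.floordiv pos n
  let c := PySem.Int.mod pos n
  [((1:Int), n - c - 1), ((-1:Int), c), (n, n - r - 1), (-n, r)].foldl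
    (fun targets sc =>
      let cut := pvCut pos sc.1 forbidden (sc.2 + 1)
      targets ++ (PySem.List.pyRange 1 cut 1).map (fun k => pos + k * sc.1)) []

-- ===== PRECONDITION & SPEC =====
-- Pre_ excludes only n = 0, where A raises ZeroDivisionError on 'pos // n'
def Pre_zero_slide_targets_py (pos : Int) (n : Int) (forbidden : List Int) : Prop := n ≠ 0
instance (pos : Int) (n : Int) (forbidden : List Int) : Decidable (Pre_zero_slide_targets_py pos n forbidden) := by unfold Pre_zero_slide_targets_py; infer_instance

def pvWitness_zero_slide_targets_py : Int × Int × List Int := (4, 3, [5])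

def Spec_zero_slide_targets_py (pos : Int) (n : Int) (forbidden : List Int) (out : List Int) : Prop := out = zero_slide_targets_py_alt pos n forbidden
instance (pos : Int) (n : Int) (forbidden : List Int) (out : List Int) : Decidable (Spec_zero_slide_targets_py pos n forbidden out) := by unfold Spec_zero_slide_targets_py; infer_instance

-- ===== CLAIM (what is proved, stated in full; the proofs are below) =====
def Claim_equal_zero_slide_targets_py : Prop := ∀ (pos : Int) (n : Int) (forbidden : List Int), Dom_zero_slide_targets_py pos n forbidden → Pre_zero_slide_targets_py pos n forbidden → Spec_zero_slide_targets_py pos n forbidden (zero_slide_targets_py pos n forbidden)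

-- ===== LEMMAS AND PROOFS =====

-- A's ray scan, truncation form: prefix of the ray up to the first forbidden cell
def pvTrunc (forbidden : List Int) : List Int → List Int
  | [] => []
  | x :: xs => if x ∈ forbidden then [] else x :: pvTrunc forbidden xs

-- A's append-with-break loop is 'append the truncated mapped ray'
theorem pvScanA_eq_trunc (forbidden : List Int) (f : Int → Int) :
    ∀ (L acc : List Int),
    pvScanA forbidden f L acc = acc ++ pvTrunc forbidden (L.map f) := by
  intro L
  induction L with
  | nil => intro acc; simp [pvScanA, pvTrunc]
  | cons d ds ih =>
    intro acc
    by_cases h : f d ∈ forbidden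
    · simp [pvScanA, h, pvTrunc]
    · simp only [pvScanA, if_neg h, List.map_cons, pvTrunc, ih]
      simp [h]

theorem pvCut_le (pos step : Int) :
    ∀ (fs : List Int) (cut : Int), pvCut pos step fs cut ≤ cut := by
  intro fs
  induction fs with
  | nil => intro cut; simp [pvCut]
  | cons f fs ih =>
    intro cut
    simp only [pvCut]
    split_ifs with h1 h2
    · exact le_trans (ih _) (le_of_lt h2.2)
    · exact ih _
    · exact ih _

-- if pvCut strictly decreased the bound, the resulting cut is a blocked quotient ≥ 1
theorem pvCut_mem (pos step : Int) :
    ∀ (fs : List Int) (cut : Int), pvCut pos step fs cut < cut →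
    1 ≤ pvCut pos step fs cut ∧ pos + (pvCut pos step fs cut) * step ∈ fs := by
  intro fs
  induction fs with
  | nil => intro cut h; simp [pvCut] at h
  | cons f fs ih =>
    intro cut h
    simp only [pvCut] at h ⊢
    split_ifs at h ⊢ with h1 h2
    · by_cases hlt : pvCut pos step fs (PySem.Int.floordiv (f - pos) step) <
          PySem.Int.floordiv (f - pos) step
      · have := ih _ hlt
        exact ⟨this.1, List.mem_cons_of_mem _ this.2⟩
      · have heq : pvCut pos step fs (PySem.Int.floordiv (f - pos) step) =
            PySem.Int.floordiv (f - pos) step :=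
          le_antisymm (pvCut_le _ _ _ _) (not_lt.mp hlt)
        refine ⟨by rw [heq]; exact h2.1, ?_⟩
        have hh := PySem.Int.floordiv_mul_add_mod (f - pos) step
        rw [h1] at hh
        have hfeq : pos + pvCut pos step fs (PySem.Int.floordiv (f - pos) step) * step = f := by
          rw [heq]; omega
        rw [hfeq]
        exact List.mem_cons_self
    · have := ih _ h; exact ⟨this.1, List.mem_cons_of_mem _ this.2⟩
    · have := ih _ h; exact ⟨this.1, List.mem_cons_of_mem _ this.2⟩

-- exact quotient for a multiple (step ≠ 0)
theorem pv_mod_mul (step k : Int) (hs : step ≠ 0) :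
    PySem.Int.mod (k * step) step = 0 := by
  rw [PySem.Int.mod_eq_zero_iff_dvd]
  exact ⟨k, mul_comm k step⟩

theorem pv_floordiv_mul (step k : Int) (hs : step ≠ 0) :
    PySem.Int.floordiv (k * step) step = k := by
  have h := PySem.Int.floordiv_mul_add_mod (k * step) step
  rw [pv_mod_mul step k hs] at h
  have h2 : PySem.Int.floordiv (k * step) step * step = k * step := by omega
  exact mul_right_cancel₀ hs h2

-- no cell strictly below the computed cut is forbidden
theorem pvCut_min (pos step : Int) (hs : step ≠ 0) :
    ∀ (fs : List Int) (cut k : Int), 1 ≤ k → k < pvCut pos step fs cut →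
    pos + k * step ∉ fs := by
  intro fs
  induction fs with
  | nil => intro cut k _ _; simp
  | cons f fs ih =>
    intro cut k hk1 hk2
    simp only [pvCut] at hk2
    intro hmem
    rcases List.mem_cons.mp hmem with hf | hf
    · -- pos + k*step = f, so the quotient of f - pos is exactly k
      have hd : f - pos = k * step := by omega
      have hm : PySem.Int.mod (f - pos) step = 0 := by rw [hd]; exact pv_mod_mul step k hs
      have hq : PySem.Int.floordiv (f - pos) step = k := by rw [hd]; exact pv_floordiv_mul step k hs
      rw [if_pos hm, hq] at hk2
      split_ifs at hk2 with h2
      · -- cut became k, but k < pvCut … k ≤ k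
        have := pvCut_le pos step fs k
        omega
      · -- ¬(1 ≤ k ∧ k < cut), yet 1 ≤ k and k < pvCut … cut ≤ cut
        have := pvCut_le pos step fs cut
        exact h2 ⟨hk1, by omega⟩
    · split_ifs at hk2 with h1 h2
      · exact ih _ k hk1 hk2 hf
      · exact ih _ k hk1 hk2 hf
      · exact ih _ k hk1 hk2 hf

-- truncation of a mapped range, given the first-blocked bound res
theorem pvTrunc_range (forbidden : List Int) (g : Int → Int) :
    ∀ (fuel : Nat) (j m res : Int), (m - j).toNat ≤ fuel → j ≤ res → res ≤ m →
    (∀ k, j ≤ k → k < res → g k ∉ forbidden) → (res < m → g res ∈ forbidden) →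
    pvTrunc forbidden ((PySem.List.pyRange j m 1).map g) =
      (PySem.List.pyRange j res 1).map g := by
  intro fuel
  induction fuel with
  | zero =>
    intro j m res hfuel hjr hrm _ _
    have hmj : m ≤ j := by omega
    rw [PySem.List.pyRange_one_eq_nil hmj, PySem.List.pyRange_one_eq_nil (by omega)]
    rfl
  | succ fuel ih =>
    intro j m res hfuel hjr hrm hfree hblock
    by_cases hjm : j < m
    · rw [PySem.List.pyRange_one_cons hjm]
      by_cases hjr' : j < res
      · rw [PySem.List.pyRange_one_cons (by omega : j < res)]
        simp only [List.map_cons, pvTrunc, if_neg (hfree j le_rfl hjr')]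
        rw [ih (j+1) m res (by omega) (by omega) hrm
            (fun k hk1 hk2 => hfree k (by omega) hk2) hblock]
      · have hje : res = j := by omega
        have hblk : g res ∈ forbidden := hblock (by omega)
        simp only [List.map_cons, pvTrunc, hje ▸ hblk, if_pos]
        rw [PySem.List.pyRange_one_eq_nil (by omega : res ≤ j)]
        rfl
    · rw [PySem.List.pyRange_one_eq_nil (by omega), PySem.List.pyRange_one_eq_nil (by omega)]
      rfl

-- one ray: A's scan equals B's range up to the computed cut
theorem pvRay (forbidden : List Int) (pos step m : Int) (hs : step ≠ 0) (acc : List Int) :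
    pvScanA forbidden (fun k => pos + k * step) (PySem.List.pyRange 1 m 1) acc =
      acc ++ (PySem.List.pyRange 1 (pvCut pos step forbidden m) 1).map (fun k => pos + k * step) := by
  rw [pvScanA_eq_trunc]
  congr 1
  set res := pvCut pos step forbidden m with hres
  by_cases hm : m ≤ 1
  · -- empty ray: cut stays ≥ anything below, both ranges empty
    have h1 : res ≤ m := pvCut_le pos step forbidden m
    have h2 : ¬ res < m ∨ res ≥ 1 := by
      by_cases h : res < m
      · right; exact (pvCut_mem pos step forbidden m h).1
      · left; exact h
    have hresle : res ≤ 1 := by omega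
    rw [PySem.List.pyRange_one_eq_nil hm, PySem.List.pyRange_one_eq_nil hresle]
    rfl
  · push_neg at hm
    have hle : res ≤ m := pvCut_le pos step forbidden m
    have hge : 1 ≤ res := by
      by_cases h : res < m
      · exact (pvCut_mem pos step forbidden m h).1
      · omega
    exact pvTrunc_range forbidden (fun k => pos + k * step) (m - 1).toNat 1 m res
      (by omega) hge hle
      (fun k hk1 hk2 => pvCut_min pos step hs forbidden m k hk1 hk2)
      (fun hlt => (pvCut_mem pos step forbidden m hlt).2)

-- ===== VERDICT (by name: the statement is the Claim_ definition above) =====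
theorem zero_slide_targets_py_spec : Claim_equal_zero_slide_targets_py := by
  intro pos n forbidden _hdom hpre
  unfold Spec_zero_slide_targets_py zero_slide_targets_py zero_slide_targets_py_alt
  set r := PySem.Int.floordiv pos n with hr
  set c := PySem.Int.mod pos n with hc
  have hpos : r * n + c = pos := PySem.Int.floordiv_mul_add_mod pos n
  simp only [List.foldl]
  have e1 : (fun dc => r*n+c+dc) = (fun k : Int => pos + k * 1) := by
    funext k; rw [← hpos]; ring
  have e2 : (fun dc => r*n+c-dc) = (fun k : Int => pos + k * (-1)) := by
    funext k; rw [← hpos]; ring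
  have e3 : (fun dr => (r+dr)*n+c) = (fun k : Int => pos + k * n) := by
    funext k; rw [← hpos]; ring
  have e4 : (fun dr => (r-dr)*n+c) = (fun k : Int => pos + k * (-n)) := by
    funext k; rw [← hpos]; ring
  rw [e1, e2, e3, e4,
      show n - c = (n - c - 1) + 1 by ring, show n - r = (n - r - 1) + 1 by ring,
      pvRay forbidden pos 1 _ one_ne_zero,
      pvRay forbidden pos (-1) _ (by norm_num),
      pvRay forbidden pos n _ hpre,
      pvRay forbidden pos (-n) _ (by simpa using hpre)]
  norm_num
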